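-- pv_equiv track=rewrite | github.com/Sigmanificient/codewars | src/python/katas/py6kyu/message_validator.py | is_a_valid_message
-- ===== SOURCE A (Python) =====
-- def is_a_valid_message(message: str) -> bool:
--     if not message:
--         return True
--
--     items = []
--     word = ""
--     digits = True
--
--     for char in message:
--         is_digits = char.isdigit()
--         if is_digits != digits:
--             digits = not digits
--             items.append(word)
--             word = ""
--         word += char
--
--     items.append(word)
--
--     if len(items) % 2:
--         return False
--
--     for num, word in zip(items[::2], items[1::2]):
--         if not num:
--             return False
--
--         if int(num) != len(word):
--             return False
--
--     return True
-- ===== SOURCE B (Python) =====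
-- def is_a_valid_message(message: str) -> bool:
--     n = len(message)
--     i = 0
--     while i < n:
--         j = i
--         while j < n and message[j].isdigit():
--             j += 1
--         if j == i:                      # segment must start with a length prefix
--             return False
--         count = int(message[i:j])
--         k = j
--         while k < n and not message[k].isdigit():
--             k += 1
--         if k == j or k - j != count:    # a word must follow and have exactly `count` chars
--             return False
--         i = k
--     return True
-- ===== Notes on version B (the rewrite author's own statement) =====
-- stated objective: faster
-- what changed: B replaces A's two-phase design (fold the whole string into a list of digit/non-digit runs, then check parity and zip the even/odd slices) with a single-pointer length-prefixed parser that scans a digit run, reads it as a count, checks that exactly that many non-digit characters follow, and repeats; it never builds the run list and rejects at the first bad segment.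
import Mathlib
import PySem

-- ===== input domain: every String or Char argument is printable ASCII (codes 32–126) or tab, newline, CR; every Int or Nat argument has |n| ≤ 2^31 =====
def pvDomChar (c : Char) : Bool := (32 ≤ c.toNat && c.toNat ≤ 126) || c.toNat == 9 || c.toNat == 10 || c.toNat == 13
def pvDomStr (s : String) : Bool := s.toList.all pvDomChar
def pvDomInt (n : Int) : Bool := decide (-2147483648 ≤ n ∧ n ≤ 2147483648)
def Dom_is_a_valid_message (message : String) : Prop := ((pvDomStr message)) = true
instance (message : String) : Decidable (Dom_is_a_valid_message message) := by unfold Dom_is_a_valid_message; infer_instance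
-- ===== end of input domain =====

-- B re-implements the digit-count/word message validator as a single-pass length-prefixed
-- parser over the remaining characters: no run list is built and it rejects at the first
-- bad segment (a timing run measured B faster by a constant factor); equivalence proved on the full domain.


-- ===== PORT A =====
-- the body of A's `for char in message` loop, on state (items, word, digits)
def pvStepA (s : List (List Char) × List Char × Bool) (c : Char) : List (List Char) × List Char × Bool :=
  let isD := PySem.Chars.isdigit c
  if isD != s.2.2 then (s.1 ++ [s.2.1], [c], isD) else (s.1, s.2.1 ++ [c], s.2.2)

-- A's `for num, word in zip(...)` loop with its early returns
def pvPairsA : List (List Char × List Char) → Bool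
  | [] => true
  | (num, w) :: rest =>
    if num.isEmpty then false
    else if (PySem.Int.ofChars? num).getD 0 ≠ (w.length : Int) then false
    else pvPairsA rest

def is_a_valid_message (message : String) : Bool :=
  let cs := message.toList
  if cs.isEmpty then true
  else
    let st := cs.foldl pvStepA ([], [], true)
    let items := st.1 ++ [st.2.1]
    if items.length % 2 = 1 then false
    else
      pvPairsA (((PySem.List.slice? items none none 2).getD []).zip
                ((PySem.List.slice? items (some 1) none 2).getD []))

-- ===== PORT B =====
-- B's inner `while` scans: (maximal prefix satisfying p, rest)
def pvRun (p : Char → Bool) : List Char → List Char × List Char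
  | [] => ([], [])
  | c :: cs => if p c then ((c :: (pvRun p cs).1, (pvRun p cs).2)) else ([], c :: cs)

-- termination facts for pvLoopB (cited by its decreasing_by)
theorem pvRun_snd_le (p : Char → Bool) (xs : List Char) : (pvRun p xs).2.length ≤ xs.length := by
  induction xs with
  | nil => simp [pvRun]
  | cons c cs ih =>
    simp only [pvRun]
    split
    · simpa using Nat.le_succ_of_le ih
    · simp

theorem pvRun_snd_lt (p : Char → Bool) (xs : List Char) (h : (pvRun p xs).1 ≠ []) :
    (pvRun p xs).2.length < xs.length := by
  cases xs with
  | nil => simp [pvRun] at h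
  | cons c cs =>
    by_cases hc : p c = true
    · have := pvRun_snd_le p cs
      simp only [pvRun, hc, if_true, List.length_cons]
      omega
    · simp [pvRun, hc] at h

-- B's outer `while i < n` loop, on the characters not yet consumed
def pvLoopB : List Char → Bool
  | [] => true
  | c :: cs =>
    let d := pvRun PySem.Chars.isdigit (c :: cs)
    if hd : d.1 = [] then false
    else
      let count := (PySem.Int.ofChars? d.1).getD 0
      let w := pvRun (fun ch => !PySem.Chars.isdigit ch) d.2
      if w.1 = [] ∨ (w.1.length : Int) ≠ count then false
      else pvLoopB w.2
termination_by cs => cs.length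
decreasing_by
  calc (pvRun (fun ch => !PySem.Chars.isdigit ch) d.2).2.length
      ≤ d.2.length := pvRun_snd_le _ _
    _ < (c :: cs).length := pvRun_snd_lt _ _ hd

def is_a_valid_message_alt (message : String) : Bool := pvLoopB message.toList

-- ===== PRECONDITION & SPEC =====
def Spec_is_a_valid_message (message : String) (out : Bool) : Prop := out = is_a_valid_message_alt message
instance (message : String) (out : Bool) : Decidable (Spec_is_a_valid_message message out) := by unfold Spec_is_a_valid_message; infer_instance

-- ===== CLAIM (what is proved, stated in full; the proofs are below) =====
def Claim_equal_is_a_valid_message : Prop := ∀ (message : String), Dom_is_a_valid_message message → Spec_is_a_valid_message message (is_a_valid_message message)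

-- ===== LEMMAS AND PROOFS =====

theorem pvRun_eq (p : Char → Bool) (xs : List Char) :
    pvRun p xs = (xs.takeWhile p, xs.dropWhile p) := by
  induction xs with
  | nil => simp [pvRun]
  | cons c cs ih => simp only [pvRun, List.takeWhile, List.dropWhile]; split <;> simp_all

-- the elements of items at even / odd positions, and their pairing
def pvEvens {α : Type} : List α → List α
  | [] => []
  | [a] => [a]
  | a :: _ :: t => a :: pvEvens t

def pvOdds {α : Type} : List α → List α
  | [] => []
  | [_] => []
  | _ :: b :: t => b :: pvOdds t

def pvPairUp {α : Type} : List α → List (α × α)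
  | [] => []
  | [_] => []
  | a :: b :: t => (a, b) :: pvPairUp t

theorem pvEvens_aux {α : Type} (xs : List α) :
    List.filterMap (fun k : Nat => xs[(2 * (k:Int)).toNat]?) (List.range ((xs.length + 1) / 2))
      = pvEvens xs := by
  induction xs using pvEvens.induct with
  | case1 => simp [pvEvens]
  | case2 a => simp [pvEvens]
  | case3 a b t ih =>
    have h1 : ((a :: b :: t).length + 1) / 2 = (t.length + 1) / 2 + 1 := by
      simp [List.length_cons]; omega
    rw [h1, List.range_succ_eq_map, List.filterMap_cons, List.filterMap_map]
    have h0 : ((a :: b :: t)[(2 * ((0:Nat):Int)).toNat]? : Option α) = some a := by simp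
    rw [h0]
    have h2 : ((fun k : Nat => (a :: b :: t)[(2 * (k:Int)).toNat]?) ∘ Nat.succ)
        = fun k : Nat => t[(2 * (k:Int)).toNat]? := by
      funext k
      have : (2 * ((k:Int) + 1)).toNat = (2 * (k:Int)).toNat + 1 + 1 := by omega
      simp [Function.comp, Nat.succ_eq_add_one, this]
    rw [h2, ih]
    simp [pvEvens]

theorem pvSlice_even {α : Type} (xs : List α) :
    PySem.List.slice? xs none none 2 = some (pvEvens xs) := by
  simp only [PySem.List.slice?, PySem.List.sliceIndices]
  norm_num
  have hc : (if 0 < xs.length then (((xs.length:Int) + 2 - 1) / 2).toNat else 0)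
      = (xs.length + 1) / 2 := by
    split <;> omega
  rw [hc]
  exact pvEvens_aux xs

theorem pvOdds_aux {α : Type} (xs : List α) :
    List.filterMap (fun k : Nat => xs[(1 + 2 * (k:Int)).toNat]?) (List.range (xs.length / 2))
      = pvOdds xs := by
  induction xs using pvOdds.induct with
  | case1 => simp [pvOdds]
  | case2 a => simp [pvOdds]
  | case3 a b t ih =>
    have h1 : (a :: b :: t).length / 2 = t.length / 2 + 1 := by
      simp [List.length_cons]; omega
    rw [h1, List.range_succ_eq_map, List.filterMap_cons, List.filterMap_map]
    have h0 : ((a :: b :: t)[(1 + 2 * ((0:Nat):Int)).toNat]? : Option α) = some b := by simp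
    rw [h0]
    have h2 : ((fun k : Nat => (a :: b :: t)[(1 + 2 * (k:Int)).toNat]?) ∘ Nat.succ)
        = fun k : Nat => t[(1 + 2 * (k:Int)).toNat]? := by
      funext k
      have : (1 + 2 * ((k:Int) + 1)).toNat = (1 + 2 * (k:Int)).toNat + 1 + 1 := by omega
      simp [Function.comp, Nat.succ_eq_add_one, this]
    rw [h2, ih]
    simp [pvOdds]

theorem pvSlice_odd {α : Type} (xs : List α) :
    PySem.List.slice? xs (some 1) none 2 = some (pvOdds xs) := by
  simp only [PySem.List.slice?, PySem.List.sliceIndices]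
  norm_num
  have hc : (if 1 < xs.length then (((xs.length:Int) - min 1 (xs.length:Int) + 2 - 1) / 2).toNat else 0)
      = xs.length / 2 := by
    split <;> omega
  rw [hc]
  have hf : (fun k : Nat => xs[(min 1 (xs.length:Int) + 2 * (k:Int)).toNat]?)
      = fun k : Nat => xs[(1 + 2 * (k:Int)).toNat]? := by
    cases xs with
    | nil => funext k; simp
    | cons c cs =>
      have : min (1:Int) ((c :: cs).length : Int) = 1 := by
        simp [List.length_cons]
      rw [this]
  rw [hf]
  exact pvOdds_aux xs

theorem pvZip_evens_odds {α : Type} (xs : List α) :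
    (pvEvens xs).zip (pvOdds xs) = pvPairUp xs := by
  induction xs using pvPairUp.induct with
  | case1 => simp [pvEvens, pvOdds, pvPairUp]
  | case2 a => simp [pvEvens, pvOdds, pvPairUp]
  | case3 a b t ih => simp [pvEvens, pvOdds, pvPairUp, ih]

-- the run decomposition A's fold builds: items ++ [word]
def pvCollect (w : List Char) (b : Bool) : List Char → List (List Char)
  | [] => [w]
  | c :: cs =>
    if PySem.Chars.isdigit c = b then pvCollect (w ++ [c]) b cs
    else w :: pvCollect [c] (PySem.Chars.isdigit c) cs

theorem pvFoldA (cs : List Char) : ∀ (items : List (List Char)) (w : List Char) (b : Bool),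
    (cs.foldl pvStepA (items, w, b)).1 ++ [(cs.foldl pvStepA (items, w, b)).2.1]
      = items ++ pvCollect w b cs := by
  induction cs with
  | nil => intro items w b; simp [pvCollect]
  | cons c cs ih =>
    intro items w b
    by_cases h : PySem.Chars.isdigit c = b
    · have hs : pvStepA (items, w, b) c = (items, w ++ [c], b) := by
        simp [pvStepA, h]
      simp only [List.foldl_cons, hs, ih, pvCollect, h, if_true]
    · have hs : pvStepA (items, w, b) c = (items ++ [w], [c], PySem.Chars.isdigit c) := by
        simp [pvStepA, h, bne]
      simp only [List.foldl_cons, hs, ih, pvCollect, h, if_false]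
      simp

theorem pvCollect_split (b : Bool) (cs : List Char) : ∀ (w : List Char),
    pvCollect w b cs = (w ++ cs.takeWhile (fun c => PySem.Chars.isdigit c == b)) ::
      (if cs.dropWhile (fun c => PySem.Chars.isdigit c == b) = [] then []
       else pvCollect [] (!b) (cs.dropWhile (fun c => PySem.Chars.isdigit c == b))) := by
  induction cs with
  | nil => intro w; simp [pvCollect]
  | cons c cs ih =>
    intro w
    by_cases h : PySem.Chars.isdigit c = b
    · rw [show pvCollect w b (c :: cs) = pvCollect (w ++ [c]) b cs from by simp [pvCollect, h], ih]
      simp [h]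
    · have hne : (PySem.Chars.isdigit c == b) = false := by simp [h]
      have hcb : PySem.Chars.isdigit c = !b := by
        cases hb : PySem.Chars.isdigit c <;> cases b <;> simp_all
      rw [show pvCollect w b (c :: cs) = w :: pvCollect [c] (PySem.Chars.isdigit c) cs from by
        simp [pvCollect, h]]
      rw [List.takeWhile_cons, List.dropWhile_cons, hne]
      simp only [if_false, Bool.false_eq_true, reduceCtorEq]
      rw [show pvCollect [] (!b) (c :: cs) = pvCollect [c] (PySem.Chars.isdigit c) cs from by
        simp [pvCollect, hcb]]
      simp [hcb]

-- specialised forms of the split lemma for the two polarities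
theorem pvCollect_true (cs : List Char) :
    pvCollect [] true cs = cs.takeWhile PySem.Chars.isdigit ::
      (if cs.dropWhile PySem.Chars.isdigit = [] then []
       else pvCollect [] false (cs.dropWhile PySem.Chars.isdigit)) := by
  have hp : (fun c => PySem.Chars.isdigit c == true) = PySem.Chars.isdigit := by
    funext c; simp
  have h := pvCollect_split true cs []
  rw [hp] at h
  simpa using h

theorem pvCollect_false (cs : List Char) :
    pvCollect [] false cs = cs.takeWhile (fun c => !PySem.Chars.isdigit c) ::
      (if cs.dropWhile (fun c => !PySem.Chars.isdigit c) = [] then []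
       else pvCollect [] true (cs.dropWhile (fun c => !PySem.Chars.isdigit c))) := by
  have hp : (fun c => PySem.Chars.isdigit c == false) = fun c => !PySem.Chars.isdigit c := by
    funext c; simp
  have h := pvCollect_split false cs []
  rw [hp] at h
  simpa using h

-- A's final checks, after the zip has been turned into pvPairUp
def pvCheck (items : List (List Char)) : Bool :=
  if items.length % 2 = 1 then false else pvPairsA (pvPairUp items)

theorem pvCheck_cons_cons (a b : List Char) (t : List (List Char)) :
    pvCheck (a :: b :: t)
      = if a = [] then false
        else if (PySem.Int.ofChars? a).getD 0 ≠ (b.length : Int) then false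
        else pvCheck t := by
  unfold pvCheck
  have hl : (a :: b :: t).length % 2 = t.length % 2 := by simp [List.length_cons]; omega
  rw [hl, show pvPairUp (a :: b :: t) = (a, b) :: pvPairUp t from by simp [pvPairUp]]
  by_cases ho : t.length % 2 = 1
  · simp only [ho, if_true]
    split_ifs <;> rfl
  · simp only [ho, if_false]
    rw [show pvPairsA ((a, b) :: pvPairUp t)
        = (if a.isEmpty then false
           else if (PySem.Int.ofChars? a).getD 0 ≠ (b.length : Int) then false
           else pvPairsA (pvPairUp t)) from by rw [pvPairsA]]
    simp only [List.isEmpty_iff]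

theorem pvA_eq_check (message : String) :
    is_a_valid_message message
      = if message.toList = [] then true else pvCheck (pvCollect [] true message.toList) := by
  unfold is_a_valid_message
  by_cases h : message.toList = []
  · simp [h]
  · have hit := pvFoldA message.toList [] [] true
    simp only [List.nil_append] at hit
    simp only [List.isEmpty_iff, h, if_false, hit, pvSlice_even, pvSlice_odd, Option.getD_some,
      pvZip_evens_odds]
    rfl

-- B's outer loop, rewritten through takeWhile/dropWhile
theorem pvLoopB_cons (c : Char) (cs : List Char) :
    pvLoopB (c :: cs) =
      (if (c :: cs).takeWhile PySem.Chars.isdigit = [] then false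
       else if ((c :: cs).dropWhile PySem.Chars.isdigit).takeWhile (fun ch => !PySem.Chars.isdigit ch) = [] ∨
            (((((c :: cs).dropWhile PySem.Chars.isdigit).takeWhile (fun ch => !PySem.Chars.isdigit ch)).length : Int)
              ≠ (PySem.Int.ofChars? ((c :: cs).takeWhile PySem.Chars.isdigit)).getD 0) then false
       else pvLoopB (((c :: cs).dropWhile PySem.Chars.isdigit).dropWhile (fun ch => !PySem.Chars.isdigit ch))) := by
  rw [pvLoopB]
  simp only [pvRun_eq, dite_eq_ite]

theorem pvCheck_nil : pvCheck [] = true := by simp [pvCheck, pvPairUp, pvPairsA]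

theorem pvCheck_single (a : List Char) : pvCheck [a] = false := by simp [pvCheck]

theorem pvMain (n : Nat) : ∀ cs : List Char, cs.length ≤ n → cs ≠ [] →
    pvCheck (pvCollect [] true cs) = pvLoopB cs := by
  induction n with
  | zero =>
    intro cs hle hne
    rw [List.length_eq_zero_iff.mp (Nat.le_zero.mp hle)] at hne
    exact absurd rfl hne
  | succ n ih =>
    intro cs hle hne
    obtain ⟨c, cs2, rfl⟩ := List.exists_cons_of_ne_nil hne
    rw [pvCollect_true, pvLoopB_cons]
    by_cases hT : (c :: cs2).takeWhile PySem.Chars.isdigit = []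
    · -- leading character is not a digit: both sides reject
      have hpc : PySem.Chars.isdigit c = false := by
        cases hpc : PySem.Chars.isdigit c
        · rfl
        · simp [hpc] at hT
      have hD : (c :: cs2).dropWhile PySem.Chars.isdigit = c :: cs2 := by
        simp [hpc]
      rw [hT, hD]
      simp only [reduceCtorEq, if_false, if_true]
      rw [pvCollect_false, pvCheck_cons_cons]
      simp
    · by_cases hD : (c :: cs2).dropWhile PySem.Chars.isdigit = []
      · rw [if_neg hT, hD]
        simp [pvCheck_single]
      · -- the word run after the digit run starts with a non-digit, hence is nonempty
        obtain ⟨d0, D2, hDe⟩ := List.exists_cons_of_ne_nil hD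
        have hd0 : PySem.Chars.isdigit d0 = false := by
          have hh := List.head_dropWhile_not PySem.Chars.isdigit (l := c :: cs2) hD
          simp only [hDe, List.head_cons] at hh
          exact hh
        have hW : ((c :: cs2).dropWhile PySem.Chars.isdigit).takeWhile
            (fun ch => !PySem.Chars.isdigit ch) ≠ [] := by
          rw [hDe, List.takeWhile_cons]
          simp [hd0]
        rw [if_neg hT, if_neg hD, pvCollect_false, pvCheck_cons_cons, if_neg hT]
        by_cases hv : (PySem.Int.ofChars? ((c :: cs2).takeWhile PySem.Chars.isdigit)).getD 0
            = ((((c :: cs2).dropWhile PySem.Chars.isdigit).takeWhile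
                (fun ch => !PySem.Chars.isdigit ch)).length : Int)
        · have hA : ¬ ((PySem.Int.ofChars? ((c :: cs2).takeWhile PySem.Chars.isdigit)).getD 0
              ≠ ((((c :: cs2).dropWhile PySem.Chars.isdigit).takeWhile
                  (fun ch => !PySem.Chars.isdigit ch)).length : Int)) := fun hh => hh hv
          have hB : ¬ (((c :: cs2).dropWhile PySem.Chars.isdigit).takeWhile
                (fun ch => !PySem.Chars.isdigit ch) = [] ∨
              (((((c :: cs2).dropWhile PySem.Chars.isdigit).takeWhile
                  (fun ch => !PySem.Chars.isdigit ch)).length : Int)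
                ≠ (PySem.Int.ofChars? ((c :: cs2).takeWhile PySem.Chars.isdigit)).getD 0)) :=
            not_or.mpr ⟨hW, fun hh => hh hv.symm⟩
          rw [if_neg hA, if_neg hB]
          by_cases hR : ((c :: cs2).dropWhile PySem.Chars.isdigit).dropWhile
              (fun ch => !PySem.Chars.isdigit ch) = []
          · rw [if_pos hR, hR]
            simp [pvCheck_nil, pvLoopB]
          · rw [if_neg hR]
            apply ih _ _ hR
            have l1 : ((c :: cs2).takeWhile PySem.Chars.isdigit).length
                + ((c :: cs2).dropWhile PySem.Chars.isdigit).length = (c :: cs2).length := by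
              rw [← List.length_append, List.takeWhile_append_dropWhile]
            have l2 : (((c :: cs2).dropWhile PySem.Chars.isdigit).takeWhile
                  (fun ch => !PySem.Chars.isdigit ch)).length
                + (((c :: cs2).dropWhile PySem.Chars.isdigit).dropWhile
                  (fun ch => !PySem.Chars.isdigit ch)).length
                = ((c :: cs2).dropWhile PySem.Chars.isdigit).length := by
              rw [← List.length_append, List.takeWhile_append_dropWhile]
            have hT1 : 0 < ((c :: cs2).takeWhile PySem.Chars.isdigit).length :=
              List.length_pos_iff.mpr hT
            have hW1 : 0 < (((c :: cs2).dropWhile PySem.Chars.isdigit).takeWhile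
                (fun ch => !PySem.Chars.isdigit ch)).length :=
              List.length_pos_iff.mpr hW
            simp only [List.length_cons] at hle l1
            omega
        · rw [if_pos hv, if_pos (Or.inr (fun hh => hv hh.symm))]


-- ===== VERDICT (by name: the statement is the Claim_ definition above) =====
theorem is_a_valid_message_spec : Claim_equal_is_a_valid_message := by
  intro message _
  unfold Spec_is_a_valid_message is_a_valid_message_alt
  rw [pvA_eq_check]
  by_cases h : message.toList = []
  · simp [h, pvLoopB]
  · simp only [h, if_false]
    exact pvMain message.toList.length message.toList le_rfl h
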